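-- pv_equiv track=rewrite | github.com/jaimiles23/HackerRank_Solutions | python/03_strings/11_alphabetrangoli.py | get_width
-- ===== SOURCE A (Python) =====
-- def get_width(n: int) -> int:
--     """Returns width of rangoli."""
--     if n == 1:  # basecase
--         return 1
--
--     width = 0
--     for i in range(n):
--         if i == 0:      ## Middle char
--             width += 3
--         elif i < n-1:   ## Inter-rim chars
--             width += 4
--         elif i == n-1:  ## Bookend chars
--             width += 2
--     return width
-- ===== SOURCE B (Python) =====
-- def get_width(n: int) -> int:
--     """Returns width of rangoli."""
--     if n <= 0:
--         return 0
--     if n == 1: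
--         return 1
--     return 4 * n - 3
-- ===== Notes on version B (the rewrite author's own statement) =====
-- stated objective: faster
-- what changed: Replaced the O(n) per-row accumulation loop with the closed form 4n-3 (0 for n<=0, 1 for n==1).
import Mathlib
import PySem

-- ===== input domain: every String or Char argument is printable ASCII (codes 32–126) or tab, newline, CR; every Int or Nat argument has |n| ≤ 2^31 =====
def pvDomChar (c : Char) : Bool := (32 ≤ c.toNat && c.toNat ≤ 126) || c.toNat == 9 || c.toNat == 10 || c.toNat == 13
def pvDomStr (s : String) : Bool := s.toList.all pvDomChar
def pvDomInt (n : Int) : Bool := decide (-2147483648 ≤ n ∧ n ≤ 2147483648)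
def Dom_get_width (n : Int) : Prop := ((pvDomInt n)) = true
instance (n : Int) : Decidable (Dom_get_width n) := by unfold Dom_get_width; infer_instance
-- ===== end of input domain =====

-- B replaces A's per-row accumulation loop with a closed form (objective: faster, O(1) vs O(n)).


-- ===== PORT A =====
def get_width (n : Int) : Int :=
  if n == 1 then 1
  else
    (PySem.List.pyRange 0 n 1).foldl
      (fun width i =>
        if i == 0 then width + 3
        else if i < n - 1 then width + 4
        else if i == n - 1 then width + 2
        else width) 0

-- ===== PORT B =====
def get_width_alt (n : Int) : Int :=
  if n ≤ 0 then 0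
  else if n == 1 then 1
  else 4 * n - 3

-- ===== PRECONDITION & SPEC =====
def Spec_get_width (n : Int) (out : Int) : Prop := out = get_width_alt n
instance (n : Int) (out : Int) : Decidable (Spec_get_width n out) := by unfold Spec_get_width; infer_instance

-- ===== CLAIM (what is proved, stated in full; the proofs are below) =====
def Claim_equal_get_width : Prop := ∀ (n : Int), Dom_get_width n → Spec_get_width n (get_width n)

-- ===== LEMMAS AND PROOFS =====

-- A's loop body
def gwStep (n : Int) : Int → Int → Int := fun width i =>
  if i == 0 then width + 3
  else if i < n - 1 then width + 4
  else if i == n - 1 then width + 2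
  else width

-- Fold over the first m rows (1 ≤ m ≤ n-1) accumulates 4m-1.
theorem gw_partial (n : Int) (m : Nat) (h1 : 1 ≤ (m : Int)) (h2 : (m : Int) ≤ n - 1) :
    (PySem.List.pyRange 0 m 1).foldl (gwStep n) 0 = 4 * m - 1 := by
  induction m with
  | zero => simp at h1
  | succ k ih =>
    rw [show (((k+1 : Nat)) : Int) = (k : Int) + 1 by push_cast; ring,
        PySem.List.pyRange_one_succ_right (a := 0) (b := (k : Int)) (by positivity)]
    rw [List.foldl_append]
    by_cases hk : k = 0
    · subst hk
      simp [PySem.List.pyRange_one_eq_nil, gwStep]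
    · have hk1 : 1 ≤ (k : Int) := by exact_mod_cast Nat.one_le_iff_ne_zero.mpr hk
      rw [ih hk1 (by omega)]
      simp only [List.foldl, gwStep]
      have hne : ((k : Int) == 0) = false := by simp; omega
      have hlt : (k : Int) < n - 1 := by push_cast at h2; omega
      rw [hne]
      simp [hlt]
      ring

-- ===== VERDICT (by name: the statement is the Claim_ definition above) =====
theorem get_width_spec : Claim_equal_get_width := by
  intro n _
  unfold Spec_get_width get_width get_width_alt
  by_cases h1 : n = 1
  · simp [h1]
  · by_cases h0 : n ≤ 0
    · rw [PySem.List.pyRange_one_eq_nil h0]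
      simp [h0, h1]
    · -- n ≥ 2
      have hn2 : 2 ≤ n := by omega
      have hsplit : PySem.List.pyRange 0 n 1
          = PySem.List.pyRange 0 (n-1) 1 ++ [n-1] := by
        have := PySem.List.pyRange_one_succ_right (a := 0) (b := n - 1) (by omega)
        simpa using this
      rw [if_neg h0]
      show (if (n == 1) = true then (1:Int)
             else (PySem.List.pyRange 0 n 1).foldl (gwStep n) 0)
           = if (n == 1) = true then 1 else 4 * n - 3
      rw [if_neg (by simpa using h1), if_neg (by simpa using h1), hsplit,
          List.foldl_append]
      have hp := gw_partial n (n-1).toNat (by omega) (by omega)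
      rw [show (((n-1).toNat : Int)) = n - 1 from by omega] at hp
      rw [hp]
      have hne : (n - 1 == 0) = false := by simp; omega
      have hnlt : ¬ (n - 1 < n - 1) := lt_irrefl _
      simp only [List.foldl, gwStep, hne, if_neg hnlt, Bool.false_eq_true,
        if_false, beq_self_eq_true, if_true]
      omega
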